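-- pv_equiv track=rewrite | github.com/altCourier/COM1001-BLM1001 | 2021-Lab/lab8/lab8.py | place_tables
-- ===== SOURCE A (Python) =====
-- def place_tables(info):
--     #arrange them in the right place and the left place
--     left_tables=[]
--     right_tables=[]
--     for i in range(1,info[0]+1):
--         if i%2==0:
--             if i in info and i!=info[0]:
--                 right_tables.append("#")
--             else:
--                 right_tables.append(i)
--         else:
--             if i in info and i!=info[0]:
--                 left_tables.append("#")
--             else:
--                 left_tables.append(i)
--
--     #find the sublist of them
--     sitting_together = [] #final list
--     sitting = [] #blank list for nested lists
--     count = 0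
--     for i in range(len(right_tables)):
--         if str(right_tables[i]).isdigit() and str(left_tables[i]).isdigit():
--             sitting.extend([right_tables[i], left_tables[i]])
--             sitting.sort()
--             sitting_together.append(sitting)
--         sitting=[]
--     sitting_near(right_tables,sitting_together)
--     sitting_near(left_tables,sitting_together)
--
--     return len(sitting_together) #return the number of the people who can sit together
--
-- def sitting_near(liste,sublists):
--     """Function for people who sit together so we don't need to write it for left side and right side each"""
--
--     sits=[] # blank list for creating final nested list
--     for count in range(len(liste)-1):
--         if str(liste[count]).isdigit() and str(liste[count+1]).isdigit(): #to control if they are occupied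
--             sits.extend([liste[count],liste[count+1]])
--             sits.sort()
--             sublists.append(sits)
--             sits.clear() #to clear the list
--     return sublists
-- ===== SOURCE B (Python) =====
-- def place_tables(info):
--     n = info[0]
--     occupied = {x for x in info if x != n}
--     total = 0
--     for m in range(2, n + 1):
--         if m % 2 == 0 and m - 1 not in occupied and m not in occupied:
--             total += 1  # horizontal pair (m-1, m) sit side by side
--         if m >= 3 and m - 2 not in occupied and m not in occupied:
--             total += 1  # vertical pair (m-2, m) in the same column
--     return total
-- ===== Notes on version B (the rewrite author's own statement) =====
-- stated objective: faster
-- what changed: B drops A's left/right sentinel lists, the index-paired scan and the shared sitting_near helper: it builds the set of occupied tables once and makes a single pass over tables 2..n, counting for each table m the horizontal pair (m-1,m) when m is even and the same-column pair (m-2,m).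
import Mathlib
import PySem

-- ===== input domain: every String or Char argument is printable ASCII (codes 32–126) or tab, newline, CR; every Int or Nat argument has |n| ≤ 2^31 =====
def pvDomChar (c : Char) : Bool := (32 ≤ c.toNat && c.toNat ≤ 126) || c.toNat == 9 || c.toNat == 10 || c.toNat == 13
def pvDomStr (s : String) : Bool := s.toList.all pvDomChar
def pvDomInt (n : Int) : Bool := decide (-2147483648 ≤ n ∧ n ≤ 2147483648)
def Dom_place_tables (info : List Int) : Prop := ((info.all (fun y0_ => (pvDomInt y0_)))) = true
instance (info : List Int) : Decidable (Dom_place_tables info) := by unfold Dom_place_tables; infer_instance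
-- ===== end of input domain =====

-- B replaces A's left/right sentinel lists, the paired-index scan and the shared helper by one
-- set of occupied tables and a single pass that counts, for each table m, the horizontal pair
-- (m-1, m) and the same-column pair (m-2, m) — simpler, no intermediate lists.

-- ===== PORT A =====
-- A's table cells hold either the int i (free) or the string "#" (occupied): modelled as
-- Option Int (some i / none).  `str(cell).isdigit()` dispatches on the variant, exactly:
def pvEntryDigit (e : Option Int) : Bool :=
  match e with
  | none => PySem.Chars.strIsdigit ['#']              -- str("#").isdigit()
  | some k => PySem.Chars.strIsdigit (PySem.Int.toChars k)  -- str(k).isdigit()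

-- helper `sitting_near(liste, sublists)`; indices of the loop are always in range, pyGetD is exact there.
-- (Python mutates `sublists` in place and later clears the appended lists through aliasing; only the
-- length of the result is ever read, and it is identical.)
def sitting_near (liste : List (Option Int)) (sublists : List (List Int)) : List (List Int) :=
  (List.range (liste.length - 1)).foldl
    (fun subs (count : Nat) =>
      if pvEntryDigit (PySem.List.pyGetD liste (count : Int) none)
          && pvEntryDigit (PySem.List.pyGetD liste ((count : Int) + 1) none) then
        subs ++ [PySem.List.sorted
          [(PySem.List.pyGetD liste (count : Int) none).getD 0,
           (PySem.List.pyGetD liste ((count : Int) + 1) none).getD 0] (fun x => x) false]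
      else subs)
    sublists

def place_tables (info : List Int) : Int :=
  let first := PySem.List.pyGetD info 0 0        -- info[0]; info ≠ [] is Pre_
  let lr := (PySem.List.pyRange 1 (first + 1) 1).foldl
    (fun (st : List (Option Int) × List (Option Int)) i =>
      if PySem.Int.mod i 2 == 0 then
        if info.contains i && i != first then (st.1, st.2 ++ [none])
        else (st.1, st.2 ++ [some i])
      else
        if info.contains i && i != first then (st.1 ++ [none], st.2)
        else (st.1 ++ [some i], st.2))
    ([], [])
  let left_tables := lr.1
  let right_tables := lr.2
  let sitting_together := (List.range right_tables.length).foldl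
    (fun st (i : Nat) =>
      if pvEntryDigit (PySem.List.pyGetD right_tables (i : Int) none)
          && pvEntryDigit (PySem.List.pyGetD left_tables (i : Int) none) then
        st ++ [PySem.List.sorted
          [(PySem.List.pyGetD right_tables (i : Int) none).getD 0,
           (PySem.List.pyGetD left_tables (i : Int) none).getD 0] (fun x => x) false]
      else st)
    []
  let st2 := sitting_near right_tables sitting_together
  let st3 := sitting_near left_tables st2
  (st3.length : Int)

-- ===== PORT B =====
def place_tables_alt (info : List Int) : Int :=
  let n := PySem.List.pyGetD info 0 0            -- info[0]; info ≠ [] is Pre_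
  let occupied : PySem.Set Int := PySem.Set.ofList (info.filter (fun x => x != n))
  (PySem.List.pyRange 2 (n + 1) 1).foldl
    (fun total m =>
      let total := if PySem.Int.mod m 2 == 0
          && !(PySem.Set.contains occupied (m - 1)) && !(PySem.Set.contains occupied m)
        then total + 1 else total
      if m ≥ 3
          && !(PySem.Set.contains occupied (m - 2)) && !(PySem.Set.contains occupied m)
        then total + 1 else total)
    0

-- ===== PRECONDITION & SPEC =====
-- Pre_ excludes only info = [], on which Python A raises IndexError at info[0] (B raises there too).
def Pre_place_tables (info : List Int) : Prop := info ≠ []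
instance (info : List Int) : Decidable (Pre_place_tables info) := by unfold Pre_place_tables; infer_instance
def pvWitness_place_tables : List Int := [6, 2, 5]
def Spec_place_tables (info : List Int) (out : Int) : Prop := out = place_tables_alt info
instance (info : List Int) (out : Int) : Decidable (Spec_place_tables info out) := by unfold Spec_place_tables; infer_instance

-- ===== CLAIM (what is proved, stated in full; the proofs are below) =====
def Claim_equal_place_tables : Prop := ∀ (info : List Int), Dom_place_tables info → Pre_place_tables info → Spec_place_tables info (place_tables info)

-- ===== LEMMAS AND PROOFS =====

theorem pvDigitChar_isdigit (m : Nat) (h : m < 10) : PySem.Chars.isdigit (Nat.digitChar m) = true := by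
  interval_cases m <;> decide

theorem pvToDigitsCore_mem : ∀ (f n : Nat) (l : List Char) (c : Char),
    c ∈ Nat.toDigitsCore 10 f n l → c ∈ l ∨ PySem.Chars.isdigit c = true := by
  intro f
  induction f with
  | zero => intro n l c hc; exact Or.inl hc
  | succ f ih =>
    intro n l c hc
    rw [Nat.toDigitsCore] at hc
    by_cases h : n / 10 = 0
    · simp only [h] at hc
      rcases List.mem_cons.1 hc with h1 | h1
      · exact Or.inr (h1 ▸ pvDigitChar_isdigit _ (Nat.mod_lt _ (by norm_num)))
      · exact Or.inl h1
    · simp only [h] at hc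
      rcases ih _ _ _ hc with h1 | h1
      · rcases List.mem_cons.1 h1 with h2 | h2
        · exact Or.inr (h2 ▸ pvDigitChar_isdigit _ (Nat.mod_lt _ (by norm_num)))
        · exact Or.inl h2
      · exact Or.inr h1

theorem pvToDigitsCore_ne_nil : ∀ (f n : Nat) (l : List Char), l ≠ [] → Nat.toDigitsCore 10 f n l ≠ [] := by
  intro f
  induction f with
  | zero => intro n l h; simpa [Nat.toDigitsCore] using h
  | succ f ih =>
    intro n l h
    rw [Nat.toDigitsCore]
    by_cases hn : n / 10 = 0
    · simp [hn]
    · simp only [if_neg hn]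
      exact ih _ _ (by simp)

theorem pvIsdigit_toChars (k : Int) (h : 0 ≤ k) : PySem.Chars.strIsdigit (PySem.Int.toChars k) = true := by
  rw [PySem.Int.toChars, if_neg (by omega)]
  rw [PySem.Chars.strIsdigit]
  rw [Nat.toDigits]
  rw [Bool.and_eq_true]; refine ⟨?_, ?_⟩
  · have : Nat.toDigitsCore 10 (k.toNat + 1) k.toNat [] ≠ [] := by
      rw [Nat.toDigitsCore]
      by_cases hn : k.toNat / 10 = 0
      · simp [hn]
      · simp only [if_neg hn]
        exact pvToDigitsCore_ne_nil _ _ _ (by simp)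
    simpa [List.isEmpty_iff] using this
  · rw [List.all_eq_true]
    intro c hc
    rcases pvToDigitsCore_mem _ _ _ _ hc with h1 | h1
    · simp at h1
    · exact h1

def pvOcc (info : List Int) (n i : Int) : Bool := info.contains i && i != n
def pvFree (info : List Int) (n i : Int) : Bool := !(pvOcc info n i)
def pvEnt (info : List Int) (n i : Int) : Option Int := if pvOcc info n i then none else some i

theorem pvEntryDigit_ent (info : List Int) (n i : Int) (h : 0 ≤ i) :
    pvEntryDigit (pvEnt info n i) = pvFree info n i := by
  rw [pvEnt, pvFree]
  by_cases hocc : pvOcc info n i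
  · rw [if_pos hocc, hocc]; decide
  · rw [if_neg hocc]
    simp only [Bool.not_eq_true] at hocc
    rw [hocc, Bool.not_false]
    show PySem.Chars.strIsdigit (PySem.Int.toChars i) = true
    exact pvIsdigit_toChars i h

-- A's first loop builds (left_tables, right_tables)
theorem pvBuild (info : List Int) (n : Int) : ∀ (m : Nat),
    (List.range m).foldl
      (fun (st : List (Option Int) × List (Option Int)) (k : Nat) =>
        (fun (st : List (Option Int) × List (Option Int)) (i : Int) =>
          if PySem.Int.mod i 2 == 0 then
            if info.contains i && i != n then (st.1, st.2 ++ [none])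
            else (st.1, st.2 ++ [some i])
          else
            if info.contains i && i != n then (st.1 ++ [none], st.2)
            else (st.1 ++ [some i], st.2)) st (1 + (k : Int))) ([], [])
    = ((List.range ((m+1)/2)).map (fun j => pvEnt info n (1 + (2*j : Nat))),
       (List.range (m/2)).map (fun j => pvEnt info n (1 + (2*j+1 : Nat)))) := by
  intro m
  induction m with
  | zero => simp
  | succ m ih =>
    rw [List.range_succ, List.foldl_append, ih]
    simp only [List.foldl_cons, List.foldl_nil]
    have hmod : PySem.Int.mod (1 + (m : Int)) 2 = (((1+m) % 2 : Nat) : Int) := by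
      have := PySem.Int.mod_natCast (1+m) 2
      push_cast at this ⊢
      omega
    rcases Nat.even_or_odd m with he | ho
    · -- m even: 1+m odd, appended to left_tables
      obtain ⟨t, ht⟩ := he
      have hcond : (PySem.Int.mod (1 + (m:Int)) 2 == 0) = false := by
        rw [hmod, show (1+m) % 2 = 1 by omega]; decide
      have hL : (m+1+1)/2 = (m+1)/2 + 1 := by omega
      rw [hL, show (m+1)/2 = m/2 by omega, List.range_succ]
      simp only [List.map_append, List.map_singleton]
      rw [show 2*(m/2) = m by omega]
      by_cases hocc : (info.contains (1 + (m:Int)) && ((1 + (m:Int)) != n)) = true <;>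
        simp only [hcond, hocc, Bool.false_eq_true, if_true, if_false,
          pvEnt, pvOcc]
    · -- m odd: 1+m even, appended to right_tables
      obtain ⟨t, ht⟩ := ho
      have hcond : (PySem.Int.mod (1 + (m:Int)) 2 == 0) = true := by
        rw [hmod, show (1+m) % 2 = 0 by omega]; decide
      have hR : (m+1)/2 = m/2 + 1 := by omega
      rw [show (m+1+1)/2 = (m+1)/2 by omega, hR, List.range_succ]
      simp only [List.map_append, List.map_singleton]
      rw [show 2*(m/2)+1 = m by omega]
      by_cases hocc : (info.contains (1 + (m:Int)) && ((1 + (m:Int)) != n)) = true <;>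
        simp only [hcond, hocc, Bool.false_eq_true, if_true, if_false,
          pvEnt, pvOcc]

theorem pvLenFoldIf (l : List Nat) (p : Nat → Bool) (f : Nat → List Int) (init : List (List Int)) :
    (l.foldl (fun st i => if p i then st ++ [f i] else st) init).length
      = init.length + l.countP p := by
  rw [PySem.List.foldl_append_if]
  simp [List.countP_eq_length_filter]

theorem pvNear (info : List Int) (n : Int) (e : Nat → Int) (he : ∀ j, 0 ≤ e j) (L : Nat)
    (subs : List (List Int)) :
    (sitting_near ((List.range L).map (fun j => pvEnt info n (e j))) subs).length
      = subs.length + (List.range (L-1)).countP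
          (fun j => pvFree info n (e j) && pvFree info n (e (j+1))) := by
  rw [sitting_near]
  rw [List.length_map, List.length_range]
  rw [PySem.List.foldl_congr_mem _ _
    (fun (st : List (List Int)) (i : Nat) =>
      if pvFree info n (e i) && pvFree info n (e (i+1)) then
        st ++ [PySem.List.sorted
          [(pvEnt info n (e i)).getD 0, (pvEnt info n (e (i+1))).getD 0]
          (fun x => x) false]
      else st) _ ?_]
  · exact pvLenFoldIf _ _ _ subs
  · intro acc x hx
    rw [List.mem_range] at hx
    have h1 : x < L := by omega
    have h2 : x + 1 < L := by omega
    have g1 : PySem.List.pyGetD ((List.range L).map (fun j => pvEnt info n (e j))) (x : Int) none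
        = pvEnt info n (e x) := by
      rw [PySem.List.pyGetD_natCast, List.getD_eq_getElem _ _ (by simpa using h1)]
      simp
    have g2 : PySem.List.pyGetD ((List.range L).map (fun j => pvEnt info n (e j))) ((x : Int) + 1) none
        = pvEnt info n (e (x+1)) := by
      rw [show ((x : Int) + 1) = ((x + 1 : Nat) : Int) by push_cast; ring]
      rw [PySem.List.pyGetD_natCast, List.getD_eq_getElem _ _ (by simpa using h2)]
      simp
    rw [g1, g2, pvEntryDigit_ent _ _ _ (he x), pvEntryDigit_ent _ _ _ (he (x+1))]

theorem pvHoriz (info : List Int) (n : Int) (e1 e2 : Nat → Int)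
    (he1 : ∀ j, 0 ≤ e1 j) (he2 : ∀ j, 0 ≤ e2 j) (L1 L2 : Nat) (hL : L1 ≤ L2) :
    ((List.range ((List.range L1).map (fun j => pvEnt info n (e1 j))).length).foldl
      (fun st (i : Nat) =>
        if pvEntryDigit (PySem.List.pyGetD ((List.range L1).map (fun j => pvEnt info n (e1 j))) (i : Int) none)
            && pvEntryDigit (PySem.List.pyGetD ((List.range L2).map (fun j => pvEnt info n (e2 j))) (i : Int) none) then
          st ++ [PySem.List.sorted
            [(PySem.List.pyGetD ((List.range L1).map (fun j => pvEnt info n (e1 j))) (i : Int) none).getD 0,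
             (PySem.List.pyGetD ((List.range L2).map (fun j => pvEnt info n (e2 j))) (i : Int) none).getD 0]
            (fun x => x) false]
        else st) []).length
    = (List.range L1).countP (fun j => pvFree info n (e1 j) && pvFree info n (e2 j)) := by
  rw [List.length_map, List.length_range]
  rw [PySem.List.foldl_congr_mem _ _
    (fun (st : List (List Int)) (i : Nat) =>
      if pvFree info n (e1 i) && pvFree info n (e2 i) then
        st ++ [PySem.List.sorted
          [(pvEnt info n (e1 i)).getD 0, (pvEnt info n (e2 i)).getD 0]
          (fun x => x) false]
      else st) _ ?_]
  · rw [pvLenFoldIf]; simp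
  · intro acc x hx
    rw [List.mem_range] at hx
    have g1 : PySem.List.pyGetD ((List.range L1).map (fun j => pvEnt info n (e1 j))) (x : Int) none
        = pvEnt info n (e1 x) := by
      rw [PySem.List.pyGetD_natCast, List.getD_eq_getElem _ _ (by simpa using hx)]
      simp
    have g2 : PySem.List.pyGetD ((List.range L2).map (fun j => pvEnt info n (e2 j))) (x : Int) none
        = pvEnt info n (e2 x) := by
      rw [PySem.List.pyGetD_natCast, List.getD_eq_getElem _ _ (by simpa using (by omega : x < L2))]
      simp
    rw [g1, g2, pvEntryDigit_ent _ _ _ (he1 x), pvEntryDigit_ent _ _ _ (he2 x)]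

theorem pvContains (info : List Int) (n i : Int) :
    PySem.Set.contains (PySem.Set.ofList (info.filter (fun x => x != n))) i = pvOcc info n i := by
  by_cases h1 : i ∈ info <;> by_cases h2 : i = n <;>
    simp [pvOcc, PySem.Set.contains_eq_listContains, List.contains_eq_mem, PySem.Set.mem_ofList,
      List.mem_filter, h1, h2]

-- the single-pass count B performs, per table 2+k
def pvW (g : Nat → Bool) (k : Nat) : Int :=
  (if ((2+k) % 2 == 0) && g (1+k) && g (2+k) then 1 else 0)
  + (if (decide (1 ≤ k)) && g k && g (2+k) then 1 else 0)

theorem pvCore (g : Nat → Bool) : ∀ (m : Nat),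
    (((List.range (m/2)).countP (fun j => g (2*j+2) && g (2*j+1))
      + (List.range (m/2 - 1)).countP (fun j => g (2*j+2) && g (2*j+4))
      + (List.range ((m+1)/2 - 1)).countP (fun j => g (2*j+1) && g (2*j+3)) : Nat) : Int)
    = ((List.range (m-1)).map (pvW g)).sum := by
  have hpeel : ∀ (p : Nat → Bool) (k : Nat), List.countP p (List.range (k+1))
      = List.countP p (List.range k) + (if p k then 1 else 0) := by
    intro p k
    rw [List.range_succ, List.countP_append, List.countP_cons, List.countP_nil]
    omega
  intro m
  induction m with
  | zero => simp
  | succ m ih =>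
    rcases Nat.eq_zero_or_pos m with hm0 | hm1
    · subst hm0; simp
    rcases Nat.even_or_odd m with ⟨t, ht⟩ | ⟨t, ht⟩
    · -- m = 2t (t ≥ 1): table m+1 is odd, only the same-column-left count grows
      have ht' : m = 2*t := by omega
      have htpos : 1 ≤ t := by omega
      rw [ht'] at ih ⊢
      rw [show (2*t)/2 = t by omega, show (2*t+1)/2 = t by omega] at ih
      rw [show (2*t+1)/2 = t by omega, show (2*t+1+1)/2 = t+1 by omega,
          show t+1-1 = (t-1)+1 by omega, show 2*t+1-1 = (2*t-1)+1 by omega]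
      rw [hpeel (fun j => g (2*j+1) && g (2*j+3)) (t-1)]
      rw [show List.range ((2*t-1)+1) = List.range (2*t-1) ++ [2*t-1] from List.range_succ]
      rw [List.map_append, List.sum_append, List.map_singleton, List.sum_singleton]
      have hw : ((if g (2*(t-1)+1) && g (2*(t-1)+3) then 1 else 0 : Nat) : Int)
          = pvW g (2*t-1) := by
        rw [pvW, show 2*(t-1)+1 = 2*t-1 by omega, show 2*(t-1)+3 = 2+(2*t-1) by omega,
            show (2+(2*t-1)) % 2 = 1 by omega,
            show (decide (1 ≤ 2*t-1)) = true from by simpa using (by omega : (1:Nat) ≤ 2*t-1)]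
        cases g (2*t-1) <;> cases g (2+(2*t-1)) <;> simp
      push_cast
      push_cast at ih hw
      linarith [ih, hw]
    · -- m = 2t+1: table m+1 is even: the side-by-side count grows, and the right column if t ≥ 1
      rcases Nat.eq_zero_or_pos t with ht0 | htpos
      · subst ht0
        rw [show m = 1 by omega]
        simp [pvW, List.countP_cons, List.countP_nil]
        cases hg1 : g 1 <;> cases hg2 : g 2 <;> simp
      · rw [ht] at ih ⊢
        rw [show (2*t+1)/2 = t by omega, show (2*t+1+1)/2 = t+1 by omega,
            show t+1-1 = t by omega] at ih
        rw [show (2*t+1+1)/2 = t+1 by omega, show (2*t+1+1+1)/2 = t+1 by omega]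
        rw [show t+1-1 = (t-1)+1 by omega]
        rw [hpeel (fun j => g (2*j+2) && g (2*j+4)) (t-1)]
        rw [show (t-1)+1 = t by omega]
        rw [hpeel (fun j => g (2*j+2) && g (2*j+1)) t]
        rw [show 2*t+1+1-1 = (2*t)+1 by omega]
        rw [show List.range ((2*t)+1) = List.range (2*t) ++ [2*t] from List.range_succ]
        rw [List.map_append, List.sum_append, List.map_singleton, List.sum_singleton]
        have hw : ((if g (2*t+2) && g (2*t+1) then 1 else 0 : Nat) : Int)
            + ((if g (2*(t-1)+2) && g (2*(t-1)+4) then 1 else 0 : Nat) : Int)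
            = pvW g (2*t) := by
          rw [pvW, show 2*(t-1)+2 = 2*t by omega, show 2*(t-1)+4 = 2+2*t by omega,
              show 1+2*t = 2*t+1 by omega, show (2+2*t) % 2 = 0 by omega,
              show 2*t+2 = 2+2*t by omega,
              show (decide (1 ≤ 2*t)) = true from by simpa using (by omega : (1:Nat) ≤ 2*t)]
          cases g (2*t) <;> cases g (2*t+1) <;> cases g (2+2*t) <;> simp
        push_cast
        push_cast at ih hw
        linarith [ih, hw]

theorem pvCastBeqZero (a : Nat) : (((a : Int)) == 0) = (a == 0) := by
  cases a with
  | zero => rfl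
  | succ k => simp; omega

theorem place_tables_eq (info : List Int) :
    place_tables info = place_tables_alt info := by
  simp only [place_tables, place_tables_alt]
  by_cases hpos : PySem.List.pyGetD info 0 0 ≤ 0
  · rw [PySem.List.pyRange_one_eq_nil (by omega), PySem.List.pyRange_one_eq_nil (by omega)]
    simp [sitting_near]
  · rw [not_le] at hpos
    have hm : (((PySem.List.pyGetD info 0 0).toNat : Int)) = PySem.List.pyGetD info 0 0 := by omega
    rw [← hm]
    set n : Int := ((PySem.List.pyGetD info 0 0).toNat : Int) with hndef
    set m : Nat := (PySem.List.pyGetD info 0 0).toNat with hmdef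
    -- A's range 1..n and B's range 2..n as Nat ranges
    rw [PySem.List.pyRange_one 1 (n+1), PySem.List.pyRange_one 2 (n+1)]
    rw [show ((n+1-1).toNat) = m from by omega, show ((n+1-2).toNat) = m-1 from by omega]
    rw [List.foldl_map, List.foldl_map]
    rw [pvBuild info n m]
    dsimp only
    -- B's single pass is the sum of pvW over the tables 2..n
    rw [PySem.List.foldl_congr_mem _ _
      (fun (x : Int) (y : Nat) => x + pvW (fun t => pvFree info n (t : Int)) y) _ ?_]
    · rw [PySem.List.foldl_add]
      rw [pvNear info n (fun j => (1:Int) + ((2*j : Nat) : Int))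
        (by intro j; show (0:Int) ≤ 1 + ((2*j : Nat) : Int); omega) ((m+1)/2)]
      rw [pvNear info n (fun j => (1:Int) + ((2*j+1 : Nat) : Int))
        (by intro j; show (0:Int) ≤ 1 + ((2*j+1 : Nat) : Int); omega) (m/2)]
      rw [pvHoriz info n (fun j => (1:Int) + ((2*j+1 : Nat) : Int)) (fun j => (1:Int) + ((2*j : Nat) : Int))
        (by intro j; show (0:Int) ≤ 1 + ((2*j+1 : Nat) : Int); omega)
        (by intro j; show (0:Int) ≤ 1 + ((2*j : Nat) : Int); omega) (m/2) ((m+1)/2) (by omega)]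
      rw [List.countP_congr (l := List.range (m/2))
        (q := fun j => pvFree info n ((2*j+2 : Nat) : Int) && pvFree info n ((2*j+1 : Nat) : Int))
        (by intro x hx
            rw [show (1:Int)+((2*x+1 : Nat) : Int) = ((2*x+2 : Nat):Int) by push_cast; ring,
                show (1:Int)+((2*x : Nat) : Int) = ((2*x+1 : Nat):Int) by push_cast; ring])]
      rw [List.countP_congr (l := List.range (m/2 - 1))
        (q := fun j => pvFree info n ((2*j+2 : Nat) : Int) && pvFree info n ((2*j+4 : Nat) : Int))
        (by intro x hx
            rw [show (1:Int)+((2*x+1 : Nat) : Int) = ((2*x+2 : Nat):Int) by push_cast; ring,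
                show (1:Int)+((2*(x+1)+1 : Nat) : Int) = ((2*x+4 : Nat):Int) by push_cast; ring])]
      rw [List.countP_congr (l := List.range ((m+1)/2 - 1))
        (q := fun j => pvFree info n ((2*j+1 : Nat) : Int) && pvFree info n ((2*j+3 : Nat) : Int))
        (by intro x hx
            rw [show (1:Int)+((2*x : Nat) : Int) = ((2*x+1 : Nat):Int) by push_cast; ring,
                show (1:Int)+((2*(x+1) : Nat) : Int) = ((2*x+3 : Nat):Int) by push_cast; ring])]
      rw [show ((List.countP (fun j => pvFree info n ((2*j+2 : Nat) : Int) && pvFree info n ((2*j+1 : Nat) : Int)) (List.range (m/2))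
            + List.countP (fun j => pvFree info n ((2*j+2 : Nat) : Int) && pvFree info n ((2*j+4 : Nat) : Int)) (List.range (m/2 - 1))
            + List.countP (fun j => pvFree info n ((2*j+1 : Nat) : Int) && pvFree info n ((2*j+3 : Nat) : Int)) (List.range ((m+1)/2 - 1)) : Nat) : Int)
          = ((List.range (m-1)).map (pvW (fun t => pvFree info n (t : Int)))).sum
        from pvCore (fun t => pvFree info n (t : Int)) m]
      ring
    · intro acc y hy
      rw [List.mem_range] at hy
      have hc1 : ((2:Int) + ↑y - 1) = ((1+y : Nat) : Int) := by push_cast; ring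
      have hc2 : ((2:Int) + ↑y - 2) = ((y : Nat) : Int) := by push_cast; ring
      have hc3 : ((2:Int) + ↑y) = ((2+y : Nat) : Int) := by omega
      rw [hc1, hc2, hc3, pvContains, pvContains, pvContains]
      have hmod : PySem.Int.mod ((2+y : Nat) : Int) 2 = (((2+y) % 2 : Nat) : Int) := by
        exact_mod_cast PySem.Int.mod_natCast (2+y) 2
      rw [hmod]
      rw [pvCastBeqZero ((2+y) % 2)]
      rw [show (decide (((2+y : Nat) : Int) ≥ 3)) = decide (1 ≤ y) from by
        rw [decide_eq_decide]; omega]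
      have hf : ∀ i : Int, ((!(pvOcc info n i)) = pvFree info n i) := fun i => rfl
      rw [hf, hf, hf]
      simp only [pvW]
      cases hb1 : (((2+y) % 2 == 0) && pvFree info n ((1+y : Nat) : Int) && pvFree info n ((2+y : Nat) : Int)) <;>
        cases hb2 : ((decide (1 ≤ y)) && pvFree info n ((y : Nat) : Int) && pvFree info n ((2+y : Nat) : Int)) <;>
          simp <;> ring

-- ===== VERDICT (by name: the statement is the Claim_ definition above) =====
theorem place_tables_spec : Claim_equal_place_tables := by
  intro info _ hpre
  show place_tables info = place_tables_alt info
  exact place_tables_eq info
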